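-- pv_equiv track=rewrite | github.com/Agent-Autopilot/scraping-code | process_updates.py | parse_text_input
-- ===== SOURCE A (Python) =====
-- def parse_text_input(text_input: str) -> list[str]:
--     """Split the input text into individual tasks by newlines and clean up"""
--     # Split by newlines and remove empty lines
--     tasks = [line.strip() for line in text_input.split('\n') if line.strip()]
--
--     # Group related lines together (e.g., unit creation with multiple properties)
--     grouped_tasks = []
--     current_task = []
--
--     for task in tasks:
--         # If the line starts with a common action word, it's a new task
--         action_words = ['add', 'create', 'update', 'change', 'modify', 'remove', 'delete']
--         if any(task.lower().startswith(word) for word in action_words) and current_task: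
--             grouped_tasks.append('\n'.join(current_task))
--             current_task = [task]
--         else:
--             current_task.append(task)
--
--     # Add the last task if exists
--     if current_task:
--         grouped_tasks.append('\n'.join(current_task))
--
--     return grouped_tasks
-- ===== SOURCE B (Python) =====
-- def parse_text_input(text_input: str) -> list[str]:
--     """Split the input text into individual tasks by newlines and clean up"""
--     tasks = [line.strip() for line in text_input.split('\n') if line.strip()]
--     words = ('add', 'create', 'update', 'change', 'modify', 'remove', 'delete')
--
--     def _groups(ts):
--         # each group is its head line plus the run of following non-action lines
--         if not ts:
--             return []
--         i = 1
--         while i < len(ts) and not ts[i].lower().startswith(words):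
--             i += 1
--         return ['\n'.join(ts[:i])] + _groups(ts[i:])
--
--     return _groups(tasks)
-- ===== Notes on version B (the rewrite author's own statement) =====
-- stated objective: alternative
-- what changed: Replaces A's single fold carrying a grouped-list and current-buffer accumulator (with an after-loop flush) by a recursive partition: take the head line, scan forward to the next action-word line, slice that group off and recurse on the rest.
import Mathlib
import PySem

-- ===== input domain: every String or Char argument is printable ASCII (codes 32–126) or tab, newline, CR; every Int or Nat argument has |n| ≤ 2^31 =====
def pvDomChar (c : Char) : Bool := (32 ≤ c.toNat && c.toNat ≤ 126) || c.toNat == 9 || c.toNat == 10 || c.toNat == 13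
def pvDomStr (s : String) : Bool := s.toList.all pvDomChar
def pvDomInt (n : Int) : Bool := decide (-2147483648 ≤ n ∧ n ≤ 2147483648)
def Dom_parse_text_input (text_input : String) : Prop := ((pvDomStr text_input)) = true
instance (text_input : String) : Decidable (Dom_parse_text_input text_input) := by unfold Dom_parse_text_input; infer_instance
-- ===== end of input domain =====

-- B replaces A's fold with a grouped/current accumulator pair by a recursive
-- partition: slice off one group (head + run of non-action lines) and recurse.

-- ===== PORT A =====
-- the shared first Python line: [line.strip() for line in text_input.split('\n') if line.strip()]
def pvCleanLines (text_input : String) : List String :=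
  (((PySem.Str.split? text_input "\n").getD []).map PySem.Str.strip).filter
    (fun l => PySem.Str.len l != 0)

def pvActionWords : List String :=
  ["add", "create", "update", "change", "modify", "remove", "delete"]

-- any(task.lower().startswith(word) for word in action_words)
def pvIsActionA (task : String) : Bool :=
  pvActionWords.any (fun w => PySem.Str.startswith (PySem.Str.lower task) w)

def parse_text_input (text_input : String) : List String :=
  let tasks := pvCleanLines text_input
  let st := tasks.foldl
    (fun (st : List String × List String) task =>
      let grouped := st.1
      let current := st.2
      if pvIsActionA task && !current.isEmpty then
        (grouped ++ [PySem.Str.join "\n" current], [task])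
      else
        (grouped, current ++ [task]))
    ([], [])
  if !st.2.isEmpty then st.1 ++ [PySem.Str.join "\n" st.2] else st.1

-- ===== PORT B =====
-- ts[i].lower().startswith(words)  (tuple form of startswith)
def pvIsActionB (task : String) : Bool :=
  ["add", "create", "update", "change", "modify", "remove", "delete"].any
    (fun w => PySem.Str.startswith (PySem.Str.lower task) w)

-- the while loop: number of leading non-action lines of the tail
def pvRunLen : List String → Nat
  | [] => 0
  | x :: rest => if pvIsActionB x then 0 else pvRunLen rest + 1

def pvGroups : List String → List String
  | [] => []
  | t :: rest =>
      let i := 1 + pvRunLen rest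
      PySem.Str.join "\n" (List.take i (t :: rest)) :: pvGroups (List.drop i (t :: rest))
termination_by ts => ts.length
decreasing_by
  simp only [List.length_drop, List.length_cons]
  omega

def parse_text_input_alt (text_input : String) : List String :=
  pvGroups (pvCleanLines text_input)

-- ===== PRECONDITION & SPEC =====
def Spec_parse_text_input (text_input : String) (out : List String) : Prop := out = parse_text_input_alt text_input
instance (text_input : String) (out : List String) : Decidable (Spec_parse_text_input text_input out) := by unfold Spec_parse_text_input; infer_instance

-- ===== CLAIM (what is proved, stated in full; the proofs are below) =====
def Claim_equal_parse_text_input : Prop := ∀ (text_input : String), Dom_parse_text_input text_input → Spec_parse_text_input text_input (parse_text_input text_input)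

-- ===== LEMMAS AND PROOFS =====

-- proof-side: A's groups-from-a-buffer view of the tail of the fold
def pvGF (cur : List String) : List String → List String
  | [] => [PySem.Str.join "\n" cur]
  | t :: rest =>
      if pvIsActionA t then PySem.Str.join "\n" cur :: pvGF [t] rest
      else pvGF (cur ++ [t]) rest

-- A's loop body
def pvStepA (st : List String × List String) (task : String) : List String × List String :=
  if pvIsActionA task && !st.2.isEmpty then
    (st.1 ++ [PySem.Str.join "\n" st.2], [task])
  else
    (st.1, st.2 ++ [task])

def pvFinish (st : List String × List String) : List String :=
  if !st.2.isEmpty then st.1 ++ [PySem.Str.join "\n" st.2] else st.1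

lemma pvTakeDrop_one_add {t : String} {rest : List String} (n : Nat) :
    List.take (1 + n) (t :: rest) = t :: List.take n rest ∧
      List.drop (1 + n) (t :: rest) = List.drop n rest := by
  rw [Nat.add_comm]; simp

lemma pvIsAction_eq (t : String) : pvIsActionA t = pvIsActionB t := rfl

lemma pvGroups_cons (t : String) (rest : List String) :
    pvGroups (t :: rest) =
      PySem.Str.join "\n" (t :: List.take (pvRunLen rest) rest)
        :: pvGroups (List.drop (pvRunLen rest) rest) := by
  rw [pvGroups.eq_def]
  show PySem.Str.join "\n" (List.take (1 + pvRunLen rest) (t :: rest))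
        :: pvGroups (List.drop (1 + pvRunLen rest) (t :: rest)) = _
  rw [(pvTakeDrop_one_add (pvRunLen rest)).1, (pvTakeDrop_one_add (pvRunLen rest)).2]

lemma pvFold_eq_gf (ts : List String) :
    ∀ (g cur : List String), cur ≠ [] →
      pvFinish (ts.foldl pvStepA (g, cur)) = g ++ pvGF cur ts := by
  induction ts with
  | nil =>
    intro g cur hcur
    simp [pvFinish, pvGF, hcur]
  | cons t rest ih =>
    intro g cur hcur
    by_cases h : pvIsActionA t = true
    · have hstep : pvStepA (g, cur) t = (g ++ [PySem.Str.join "\n" cur], [t]) := by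
        simp [pvStepA, h, hcur]
      rw [List.foldl_cons, hstep, ih _ [t] (by simp)]
      simp [pvGF, h]
    · have hstep : pvStepA (g, cur) t = (g, cur ++ [t]) := by
        simp [pvStepA, h]
      rw [List.foldl_cons, hstep, ih _ (cur ++ [t]) (by simp)]
      simp [pvGF, h]

lemma pvGF_eq_groups (rest : List String) :
    ∀ (cur : List String), cur ≠ [] →
      pvGF cur rest =
        PySem.Str.join "\n" (cur ++ rest.take (pvRunLen rest))
          :: pvGroups (rest.drop (pvRunLen rest)) := by
  induction rest with
  | nil =>
    intro cur hcur
    simp [pvGF, pvRunLen, pvGroups]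
  | cons t rest ih =>
    intro cur hcur
    by_cases h : pvIsActionB t = true
    · have : pvGF cur (t :: rest) = PySem.Str.join "\n" cur :: pvGF [t] rest := by
        simp [pvGF, pvIsAction_eq, h]
      rw [this, ih [t] (by simp)]
      simp only [pvRunLen, h, if_pos, List.take_zero, List.drop_zero, List.append_nil]
      rw [pvGroups_cons]
      simp
    · have : pvGF cur (t :: rest) = pvGF (cur ++ [t]) rest := by
        simp [pvGF, pvIsAction_eq, h]
      rw [this, ih (cur ++ [t]) (by simp)]
      simp only [pvRunLen, h, if_neg, Bool.false_eq_true, not_false_iff]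
      rw [Nat.add_comm (pvRunLen rest) 1, (pvTakeDrop_one_add (pvRunLen rest)).1,
          (pvTakeDrop_one_add (pvRunLen rest)).2]
      simp

lemma pvFold_eq_groups (ts : List String) :
    pvFinish (ts.foldl pvStepA ([], [])) = pvGroups ts := by
  cases ts with
  | nil => simp [pvFinish, pvGroups]
  | cons t rest =>
    have hstep : pvStepA ([], []) t = ([], [t]) := by
      simp [pvStepA]
    rw [List.foldl_cons, hstep, pvFold_eq_gf rest [] [t] (by simp),
        pvGF_eq_groups rest [t] (by simp)]
    rw [pvGroups_cons]
    simp

-- ===== VERDICT (by name: the statement is the Claim_ definition above) =====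
theorem parse_text_input_spec : Claim_equal_parse_text_input := by
  intro text_input _
  show parse_text_input text_input = parse_text_input_alt text_input
  unfold parse_text_input parse_text_input_alt
  exact pvFold_eq_groups (pvCleanLines text_input)
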